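-- pv_equiv track=rewrite | github.com/Brondee/alg-labs | lab6/task6/src/task.py | process_fibonacci
-- ===== SOURCE A (Python) =====
-- def is_fibonacci(num):
--     x1 = 5 * num ** 2 + 4
--     x2 = 5 * num ** 2 - 4
--
--     return is_perfect_square(x1) or is_perfect_square(x2)
--
-- def is_perfect_square(x):
--     if x < 0:
--         return False
--
--     left, right = 0, x
--     while left <= right:
--         mid = (left + right) // 2
--         square = mid * mid
--         if square == x:
--             return True
--         elif square < x:
--             left = mid + 1
--         else:
--             right = mid - 1
--
--     return False
--
-- def process_fibonacci(data):
--     results = []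
--
--     for num in data:
--         if is_fibonacci(num):
--             results.append("Yes\n")
--         else:
--             results.append("No\n")
--
--     return results
-- ===== SOURCE B (Python) =====
-- def process_fibonacci(data):
--     results = []
--     for num in data:
--         m = abs(num)
--         fibs = [0]
--         a, b = 0, 1
--         while b <= m:
--             fibs.append(b)
--             a, b = b, a + b
--         results.append("Yes\n" if m in fibs else "No\n")
--     return results
-- ===== Notes on version B (the rewrite author's own statement) =====
-- stated objective: alternative
-- what changed: Replaces the 5n^2+-4 perfect-square criterion (tested by a hand-written binary search per candidate) with direct generation of the Fibonacci sequence up to |num| and a membership test.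
import Mathlib
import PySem

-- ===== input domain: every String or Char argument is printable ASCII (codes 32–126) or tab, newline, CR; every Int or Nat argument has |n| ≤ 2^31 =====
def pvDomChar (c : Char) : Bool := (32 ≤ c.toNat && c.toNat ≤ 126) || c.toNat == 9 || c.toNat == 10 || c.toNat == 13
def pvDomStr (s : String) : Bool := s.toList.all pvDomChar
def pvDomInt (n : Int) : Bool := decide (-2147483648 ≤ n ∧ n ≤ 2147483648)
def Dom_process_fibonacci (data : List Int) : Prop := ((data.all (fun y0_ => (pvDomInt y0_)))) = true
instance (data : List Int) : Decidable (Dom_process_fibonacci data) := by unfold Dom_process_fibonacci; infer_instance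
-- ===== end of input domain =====

-- B replaces A's per-number 5n²±4 perfect-square criterion (tested by a hand-written
-- binary search) by generating the Fibonacci numbers up to |num| and testing membership.

-- ===== PORT A =====
-- the while-loop of is_perfect_square; state (left, right), x fixed
def pvBsearch (x left right : Int) : Bool :=
  if h : left ≤ right then
    if PySem.Int.floordiv (left + right) 2 * PySem.Int.floordiv (left + right) 2 = x then true
    else if PySem.Int.floordiv (left + right) 2 * PySem.Int.floordiv (left + right) 2 < x then
      pvBsearch x (PySem.Int.floordiv (left + right) 2 + 1) right
    else
      pvBsearch x left (PySem.Int.floordiv (left + right) 2 - 1)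
  else false
termination_by (right + 1 - left).toNat
decreasing_by
  · have hb := PySem.Int.floordiv_two_mid_bounds h
    omega
  · have hb := PySem.Int.floordiv_two_mid_bounds h
    omega

def is_perfect_square (x : Int) : Bool :=
  if x < 0 then false else pvBsearch x 0 x

def is_fibonacci (num : Int) : Bool :=
  is_perfect_square (5 * num ^ 2 + 4) || is_perfect_square (5 * num ^ 2 - 4)

def process_fibonacci (data : List Int) : List String :=
  data.foldl (fun results num =>
    results ++ [if is_fibonacci num then "Yes\n" else "No\n"]) []

-- ===== PORT B =====
-- the while-loop of Source B: appends Fibonacci values b ≤ limit (proof arguments are the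
-- loop invariants a ≤ b, 1 ≤ b, used only for termination)
def pvFibAux (limit a b : ℕ) (ha : a ≤ b) (hb : 1 ≤ b) : List ℕ :=
  if h : b ≤ limit then b :: pvFibAux limit b (a + b) (by omega) (by omega) else []
termination_by 2 * limit + 2 - (a + b)
decreasing_by omega

def process_fibonacci_alt (data : List Int) : List String :=
  data.foldl (fun results num =>
    results ++ [if num.natAbs ∈ (0 :: pvFibAux num.natAbs 0 1 (by omega) (by omega))
                then "Yes\n" else "No\n"]) []

-- ===== PRECONDITION & SPEC =====
def Spec_process_fibonacci (data : List Int) (out : List String) : Prop := out = process_fibonacci_alt data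
instance (data : List Int) (out : List String) : Decidable (Spec_process_fibonacci data out) := by unfold Spec_process_fibonacci; infer_instance

-- ===== CLAIM (what is proved, stated in full; the proofs are below) =====
def Claim_equal_process_fibonacci : Prop := ∀ (data : List Int), Dom_process_fibonacci data → Spec_process_fibonacci data (process_fibonacci data)

-- A-side: the binary search finds a square in [l, r] exactly when one exists
lemma pvBsearch_iff (x l r : Int) : 0 ≤ l →
    (pvBsearch x l r = true ↔ ∃ k, l ≤ k ∧ k ≤ r ∧ k * k = x) := by
  induction l, r using pvBsearch.induct x with
  | case1 l r h heq =>
    intro hl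
    have hmid := PySem.Int.floordiv_two_mid_bounds h
    rw [pvBsearch]
    simp only [dif_pos h, if_pos heq, true_iff]
    exact ⟨_, hmid.1, hmid.2, heq⟩
  | case2 l r h hne hlt ih =>
    intro hl
    have hmid := PySem.Int.floordiv_two_mid_bounds h
    rw [pvBsearch]
    simp only [dif_pos h, if_neg hne, if_pos hlt]
    rw [ih (by omega)]
    constructor
    · rintro ⟨k, h1, h2, h3⟩
      exact ⟨k, by omega, h2, h3⟩
    · rintro ⟨k, h1, h2, h3⟩
      refine ⟨k, ?_, h2, h3⟩
      by_contra hc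
      have hkm : k ≤ PySem.Int.floordiv (l + r) 2 := by omega
      have hsq : k * k ≤ PySem.Int.floordiv (l + r) 2 * PySem.Int.floordiv (l + r) 2 :=
        mul_self_le_mul_self (by omega) hkm
      linarith
  | case3 l r h hne hge ih =>
    intro hl
    have hmid := PySem.Int.floordiv_two_mid_bounds h
    rw [pvBsearch]
    simp only [dif_pos h, if_neg hne, if_neg hge]
    rw [ih hl]
    constructor
    · rintro ⟨k, h1, h2, h3⟩
      exact ⟨k, h1, by omega, h3⟩
    · rintro ⟨k, h1, h2, h3⟩
      refine ⟨k, h1, ?_, h3⟩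
      by_contra hc
      have hkm : PySem.Int.floordiv (l + r) 2 ≤ k := by omega
      have hsq : PySem.Int.floordiv (l + r) 2 * PySem.Int.floordiv (l + r) 2 ≤ k * k :=
        mul_self_le_mul_self (by omega) hkm
      have hx : x < PySem.Int.floordiv (l + r) 2 * PySem.Int.floordiv (l + r) 2 := by
        rcases lt_or_ge (PySem.Int.floordiv (l + r) 2 * PySem.Int.floordiv (l + r) 2) x with hA | hA
        · exact absurd hA hge
        · rcases eq_or_lt_of_le hA with hB | hB
          · exact absurd hB.symm hne
          · exact hB
      linarith
  | case4 l r h =>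
    intro hl
    rw [pvBsearch]
    simp only [dif_neg h, Bool.false_eq_true, false_iff]
    rintro ⟨k, h1, h2, _⟩
    omega

lemma is_perfect_square_iff (x : Int) :
    is_perfect_square x = true ↔ ∃ k : ℕ, (k : ℤ) * k = x := by
  unfold is_perfect_square
  split_ifs with hx
  · simp only [false_iff]
    rintro ⟨k, hk⟩
    have h0 : (0 : ℤ) ≤ (k : ℤ) * k := by positivity
    omega
  · simp only [not_lt] at hx
    rw [pvBsearch_iff x 0 x le_rfl]
    constructor
    · rintro ⟨k, h0, hkx, hsq⟩
      refine ⟨k.toNat, ?_⟩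
      rw [Int.toNat_of_nonneg h0]
      exact hsq
    · rintro ⟨k, hsq⟩
      have hn : k ≤ k * k := by
        rcases Nat.eq_zero_or_pos k with h | h
        · simp [h]
        · exact Nat.le_mul_of_pos_left k h
      have hn' : (k : ℤ) ≤ (k : ℤ) * k := by exact_mod_cast hn
      exact ⟨(k : ℤ), Int.natCast_nonneg k, by omega, hsq⟩

-- the Lucas–Fibonacci identity L_j² − 5 F_j² = 4·(−1)^j, with L_j = 2 F_{j+1} − F_j
lemma lucas_identity (j : ℕ) :
    (2 * (Nat.fib (j + 1) : ℤ) - Nat.fib j) ^ 2 - 5 * (Nat.fib j : ℤ) ^ 2 = 4 * (-1) ^ j := by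
  induction j with
  | zero => norm_num
  | succ n ih =>
    rw [show n + 1 + 1 = n + 2 from rfl, Nat.fib_add_two]
    push_cast
    linear_combination -ih

-- every Fibonacci number satisfies the 5m²±4 square criterion
lemma fib_satisfies_criterion (j : ℕ) :
    ∃ k : ℕ, k * k = 5 * Nat.fib j * Nat.fib j + 4 ∨ k * k + 4 = 5 * Nat.fib j * Nat.fib j := by
  have hle : Nat.fib j ≤ 2 * Nat.fib (j + 1) := by
    have := Nat.fib_le_fib_succ (n := j); omega
  refine ⟨2 * Nat.fib (j + 1) - Nat.fib j, ?_⟩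
  have hid := lucas_identity j
  have hcast : ((2 * Nat.fib (j + 1) - Nat.fib j : ℕ) : ℤ) =
      2 * (Nat.fib (j + 1) : ℤ) - Nat.fib j := by
    push_cast [hle]; ring
  rcases Nat.even_or_odd j with he | ho
  · left
    rw [he.neg_one_pow] at hid
    have h2 : ((2 * Nat.fib (j + 1) - Nat.fib j : ℕ) : ℤ) * ((2 * Nat.fib (j + 1) - Nat.fib j : ℕ) : ℤ)
        = 5 * (Nat.fib j : ℤ) * Nat.fib j + 4 := by
      rw [hcast]; linear_combination hid
    exact_mod_cast h2
  · right
    rw [ho.neg_one_pow] at hid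
    have h2 : ((2 * Nat.fib (j + 1) - Nat.fib j : ℕ) : ℤ) * ((2 * Nat.fib (j + 1) - Nat.fib j : ℕ) : ℤ)
        + 4 = 5 * (Nat.fib j : ℤ) * Nat.fib j := by
      rw [hcast]; linear_combination hid
    exact_mod_cast h2

-- descent: a solution of k² − 5m² = ±4 is a (Lucas, Fibonacci) pair
lemma criterion_implies_fib :
    ∀ m k : ℕ, (k * k = 5 * m * m + 4 ∨ k * k + 4 = 5 * m * m) →
      ∃ j, Nat.fib j = m ∧ k + Nat.fib j = 2 * Nat.fib (j + 1) := by
  intro m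
  induction m using Nat.strong_induction_on with
  | _ m IH =>
    intro k hk
    rcases Nat.lt_or_ge m 2 with hm | hm
    · interval_cases m
      · have hkk : k * k = 4 := by
          rcases hk with h | h
          · simpa using h
          · exfalso; generalize k * k = K at h; omega
        have hk2 : k = 2 := by nlinarith
        exact ⟨0, by simp, by simp [hk2]⟩
      · have hk13 : k = 3 ∨ k = 1 := by
          rcases hk with h | h
          · left; nlinarith
          · right; nlinarith
        rcases hk13 with rfl | rfl
        · exact ⟨2, by decide, by decide⟩
        · exact ⟨1, by decide, by decide⟩
    · have hA' : k * k = 5 * (m * m) + 4 ∨ k * k + 4 = 5 * (m * m) := by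
        rcases hk with h | h
        · left; rw [← Nat.mul_assoc]; exact h
        · right; rw [← Nat.mul_assoc]; exact h
      have hsq1 : k * k % 2 = k % 2 := by
        rcases Nat.mod_two_eq_zero_or_one k with h | h <;>
          · rw [Nat.mul_mod, h]
      have hsq2 : m * m % 2 = m % 2 := by
        rcases Nat.mod_two_eq_zero_or_one m with h | h <;>
          · rw [Nat.mul_mod, h]
      have hmm4 : 4 ≤ m * m := Nat.mul_le_mul hm hm
      have hpar : k % 2 = m % 2 := by
        generalize k * k = K at hA' hsq1
        generalize m * m = M at hA' hsq2 hmm4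
        omega
      have hmk : m < k := by
        by_contra hc
        have hc' : k ≤ m := Nat.le_of_not_lt (fun h => hc (by omega))
        have h1 : k * k ≤ m * m := Nat.mul_le_mul hc' hc'
        rcases hA' with h | h <;> omega
      have hk3 : k < 3 * m := by
        by_contra hc
        have hc' : 3 * m ≤ k := Nat.le_of_not_lt (fun h => hc (by omega))
        have h1 : 3 * m * (3 * m) ≤ k * k := Nat.mul_le_mul hc' hc'
        have h2 : 3 * m * (3 * m) = 9 * (m * m) := by ring
        rcases hA' with h | h <;> omega
      obtain ⟨m', hm'⟩ : ∃ m', k = m + 2 * m' := ⟨(k - m) / 2, by omega⟩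
      obtain ⟨k', hk'⟩ : ∃ k', k + 2 * k' = 5 * m := ⟨(5 * m - k) / 2, by omega⟩
      have hm'lt : m' < m := by omega
      have hz1 : (k : ℤ) = (m : ℤ) + 2 * m' := by exact_mod_cast hm'
      have hz2 : (k : ℤ) + 2 * k' = 5 * m := by exact_mod_cast hk'
      have e1 : 2 * (k' : ℤ) = 5 * (m : ℤ) - k := by linarith
      have e2 : 2 * (m' : ℤ) = (k : ℤ) - m := by linarith
      have hnew : k' * k' = 5 * (m' * m') + 4 ∨ k' * k' + 4 = 5 * (m' * m') := by
        rcases hA' with h | h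
        · right
          have hz3 : (k : ℤ) * k = 5 * ((m : ℤ) * m) + 4 := by exact_mod_cast h
          have h4 : (2 * (k' : ℤ)) * (2 * (k' : ℤ)) + 16 = 5 * ((2 * (m' : ℤ)) * (2 * (m' : ℤ))) := by
            rw [e1, e2]; linear_combination (-4 : ℤ) * hz3
          have h5 : (k' : ℤ) * k' + 4 = 5 * ((m' : ℤ) * m') := by linarith
          exact_mod_cast h5
        · left
          have hz3 : (k : ℤ) * k + 4 = 5 * ((m : ℤ) * m) := by exact_mod_cast h
          have h4 : (2 * (k' : ℤ)) * (2 * (k' : ℤ)) = 5 * ((2 * (m' : ℤ)) * (2 * (m' : ℤ))) + 16 := by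
            rw [e1, e2]; linear_combination (-4 : ℤ) * hz3
          have h5 : (k' : ℤ) * k' = 5 * ((m' : ℤ) * m') + 4 := by linarith
          exact_mod_cast h5
      have hnew' : k' * k' = 5 * m' * m' + 4 ∨ k' * k' + 4 = 5 * m' * m' := by
        rcases hnew with h | h
        · left; rw [Nat.mul_assoc]; exact h
        · right; rw [Nat.mul_assoc]; exact h
      obtain ⟨j, hfj, hcomp⟩ := IH m' hm'lt k' hnew'
      refine ⟨j + 1, by omega, ?_⟩
      have hff : Nat.fib (j + 1 + 1) = Nat.fib j + Nat.fib (j + 1) := Nat.fib_add_two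
      omega

lemma is_fibonacci_iff (num : Int) :
    is_fibonacci num = true ↔ ∃ j, Nat.fib j = num.natAbs := by
  unfold is_fibonacci
  rw [Bool.or_eq_true, is_perfect_square_iff, is_perfect_square_iff]
  have hnn : (num : ℤ) ^ 2 = ((num.natAbs * num.natAbs : ℕ) : ℤ) := by
    rw [Int.natAbs_mul_self]; ring
  constructor
  · rintro (⟨k, hk⟩ | ⟨k, hk⟩)
    · rw [hnn] at hk
      have hN : k * k = 5 * (num.natAbs * num.natAbs) + 4 := by exact_mod_cast hk
      obtain ⟨j, hj, -⟩ := criterion_implies_fib num.natAbs k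
        (Or.inl (by rw [← Nat.mul_assoc] at hN; exact hN))
      exact ⟨j, hj⟩
    · rw [hnn] at hk
      have hk2 : (k : ℤ) * k + 4 = 5 * ((num.natAbs * num.natAbs : ℕ) : ℤ) := by linarith
      have hN : k * k + 4 = 5 * (num.natAbs * num.natAbs) := by exact_mod_cast hk2
      obtain ⟨j, hj, -⟩ := criterion_implies_fib num.natAbs k
        (Or.inr (by rw [← Nat.mul_assoc] at hN; exact hN))
      exact ⟨j, hj⟩
  · rintro ⟨j, hj⟩
    obtain ⟨k, hcrit⟩ := fib_satisfies_criterion j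
    rw [hj] at hcrit
    rcases hcrit with h | h
    · left
      refine ⟨k, ?_⟩
      have hz : (k : ℤ) * k = 5 * ((num.natAbs : ℤ) * num.natAbs) + 4 := by
        have := h; rw [Nat.mul_assoc] at this; exact_mod_cast this
      rw [hnn]; push_cast; linarith
    · right
      refine ⟨k, ?_⟩
      have hz : (k : ℤ) * k + 4 = 5 * ((num.natAbs : ℤ) * num.natAbs) := by
        have := h; rw [Nat.mul_assoc] at this; exact_mod_cast this
      rw [hnn]; push_cast; linarith

-- B-side: pvFibAux started at (fib (i−1), fib i) lists exactly the fib j ≤ limit with j ≥ i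
lemma mem_pvFibAux (limit a b : ℕ) (ha : a ≤ b) (hb : 1 ≤ b) :
    ∀ i, 1 ≤ i → a = Nat.fib (i - 1) → b = Nat.fib i →
    ∀ x, (x ∈ pvFibAux limit a b ha hb ↔ ∃ j, i ≤ j ∧ Nat.fib j = x ∧ x ≤ limit) := by
  induction a, b, ha, hb using pvFibAux.induct limit with
  | case1 a b ha hb h ih =>
    intro i hi hA hB x
    rw [pvFibAux]
    simp only [dif_pos h, List.mem_cons]
    have hfib : a + b = Nat.fib (i + 1) := by
      have h2 : Nat.fib (i - 1 + 2) = Nat.fib (i - 1) + Nat.fib (i - 1 + 1) := Nat.fib_add_two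
      have e1 : i - 1 + 2 = i + 1 := by omega
      have e2 : i - 1 + 1 = i := by omega
      rw [e1, e2] at h2
      omega
    rw [ih (i + 1) (by omega) (by simpa using hB) hfib x]
    constructor
    · rintro (rfl | ⟨j, h1, h2, h3⟩)
      · exact ⟨i, le_rfl, hB.symm, h⟩
      · exact ⟨j, by omega, h2, h3⟩
    · rintro ⟨j, h1, h2, h3⟩
      rcases eq_or_lt_of_le h1 with rfl | hj
      · left; omega
      · right; exact ⟨j, by omega, h2, h3⟩
  | case2 a b ha hb h =>
    intro i hi hA hB x
    rw [pvFibAux]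
    simp only [dif_neg h, List.not_mem_nil, false_iff]
    rintro ⟨j, h1, h2, h3⟩
    have hmono := Nat.fib_mono h1
    omega

lemma mem_fibsUpto (m : ℕ) (ha : 0 ≤ 1) (hb : 1 ≤ 1) :
    (m ∈ (0 :: pvFibAux m 0 1 ha hb)) ↔ ∃ j, Nat.fib j = m := by
  simp only [List.mem_cons]
  rw [mem_pvFibAux m 0 1 ha hb 1 le_rfl (by decide) (by decide) m]
  constructor
  · rintro (h0 | ⟨j, _, hj, _⟩)
    · exact ⟨0, by simp [h0]⟩
    · exact ⟨j, hj⟩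
  · rintro ⟨j, hj⟩
    by_cases h0 : m = 0
    · left; exact h0
    · right
      refine ⟨j, ?_, hj, le_rfl⟩
      cases j with
      | zero => simp at hj; omega
      | succ n => omega

-- ===== VERDICT =====
theorem process_fibonacci_spec : Claim_equal_process_fibonacci := by
  unfold Claim_equal_process_fibonacci Spec_process_fibonacci
  intro data _
  unfold process_fibonacci process_fibonacci_alt
  rw [PySem.List.foldl_append_singleton_eq_map, PySem.List.foldl_append_singleton_eq_map]
  have hfun : ∀ num : Int,
      (if is_fibonacci num then "Yes\n" else "No\n")
        = (if num.natAbs ∈ (0 :: pvFibAux num.natAbs 0 1 (by omega) (by omega))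
           then "Yes\n" else "No\n") := by
    intro num
    by_cases hf : ∃ j, Nat.fib j = num.natAbs
    · rw [if_pos ((is_fibonacci_iff num).mpr hf), if_pos ((mem_fibsUpto _ _ _).mpr hf)]
    · rw [if_neg (fun hc => hf ((is_fibonacci_iff num).mp hc)),
          if_neg (fun hc => hf ((mem_fibsUpto _ _ _).mp hc))]
  simp only [hfun]
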